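-- pv_equiv track=rewrite | github.com/PaulKnauer/sonos-mcp-server | tests/unit/test_release_script.py | _contains_ordered_lines
-- ===== SOURCE A (Python) =====
-- def _contains_ordered_lines(text: str, expected_lines: list[str]) -> bool:
--     remaining = iter(expected_lines)
--     current = next(remaining, None)
--     for line in text.splitlines():
--         if current is None:
--             return True
--         if line.strip() == current:
--             current = next(remaining, None)
--     return current is None
-- ===== SOURCE B (Python) =====
-- def _contains_ordered_lines(text: str, expected_lines: list[str]) -> bool:
--     # Build an index: stripped line -> ascending list of positions where it occurs.
--     positions = {}
--     for i, line in enumerate(text.splitlines()):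
--         positions.setdefault(line.strip(), []).append(i)
--     # Greedily consume the earliest still-usable occurrence of each expected line.
--     pos = 0
--     for exp in expected_lines:
--         occ = positions.get(exp, [])
--         while occ and occ[0] < pos:
--             occ.pop(0)
--         if not occ:
--             return False
--         pos = occ.pop(0) + 1
--     return True
-- ===== Notes on version B (the rewrite author's own statement) =====
-- stated objective: alternative
-- what changed: B replaces A's sequential two-pointer scan by a hash index built in one pass (stripped line -> ascending occurrence positions) and then greedily consumes, for each expected line, its earliest occurrence at or after the current position.
import Mathlib
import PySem

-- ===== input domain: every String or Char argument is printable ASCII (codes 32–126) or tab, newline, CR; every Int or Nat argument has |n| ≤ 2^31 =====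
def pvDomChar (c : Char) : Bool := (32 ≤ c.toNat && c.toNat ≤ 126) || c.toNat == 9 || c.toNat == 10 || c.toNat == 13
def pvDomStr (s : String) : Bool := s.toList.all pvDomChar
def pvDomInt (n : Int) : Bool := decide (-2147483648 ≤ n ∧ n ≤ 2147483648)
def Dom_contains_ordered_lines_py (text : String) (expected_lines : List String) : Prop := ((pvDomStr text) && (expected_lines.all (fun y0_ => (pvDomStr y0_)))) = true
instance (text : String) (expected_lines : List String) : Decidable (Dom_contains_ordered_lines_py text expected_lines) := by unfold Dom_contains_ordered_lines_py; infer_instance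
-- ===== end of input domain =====

-- B replaces A's sequential scan by a one-pass occurrence index (stripped line -> positions)
-- consumed greedily; same return value (both programs are pure, no caller-visible mutation).

-- ===== PORT A =====
-- A's for-loop over text.splitlines(), carrying the remaining expected lines
-- ("remaining"/"current"): current is rem.head?; "current is None" is rem = [].
def pvGoA : List String → List String → Bool
  | [], rem => rem.isEmpty
  | line :: ls, rem =>
    match rem with
    | [] => true
    | e :: rest => if PySem.Str.strip line == e then pvGoA ls rest else pvGoA ls (e :: rest)

def contains_ordered_lines_py (text : String) (expected_lines : List String) : Bool :=
  pvGoA (PySem.Str.splitlines text) expected_lines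

-- ===== PORT B =====
-- the index-building loop: positions.setdefault(line.strip(), []).append(i)
def pvIndex (lines : List String) : PySem.Dict String (List Int) :=
  (PySem.List.enumerate lines).foldl
    (fun d p => d.modify (PySem.Str.strip p.2) [] (fun v => v ++ [p.1])) PySem.Dict.empty

-- the inner while-loop: 'while occ and occ[0] < pos: occ.pop(0)'
def pvDropLt : List Int → Int → List Int
  | [], _ => []
  | i :: is, pos => if i < pos then pvDropLt is pos else i :: is

-- the greedy for-loop over expected_lines; Python pops the stored list in place, so the
-- popped remainder is written back into the dict (the list obtained from .get IS the stored one)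
def pvGoAlt : List String → PySem.Dict String (List Int) → Int → Bool
  | [], _, _ => true
  | e :: es, d, pos =>
    match pvDropLt (d.getD e []) pos with
    | [] => false
    | i :: rest => pvGoAlt es (d.insert e rest) (i + 1)

def contains_ordered_lines_py_alt (text : String) (expected_lines : List String) : Bool :=
  pvGoAlt expected_lines (pvIndex (PySem.Str.splitlines text)) 0

-- ===== PRECONDITION & SPEC =====
def Spec_contains_ordered_lines_py (text : String) (expected_lines : List String) (out : Bool) : Prop := out = contains_ordered_lines_py_alt text expected_lines
instance (text : String) (expected_lines : List String) (out : Bool) : Decidable (Spec_contains_ordered_lines_py text expected_lines out) := by unfold Spec_contains_ordered_lines_py; infer_instance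

-- ===== CLAIM (what is proved, stated in full; the proofs are below) =====
def Claim_equal_contains_ordered_lines_py : Prop := ∀ (text : String) (expected_lines : List String), Dom_contains_ordered_lines_py text expected_lines → Spec_contains_ordered_lines_py text expected_lines (contains_ordered_lines_py text expected_lines)

-- ===== LEMMAS AND PROOFS =====

-- reference greedy over the STRIPPED lines (proof-only): scan for the first match, continue after it
def sScan (e : String) : List String → Option (List String)
  | [] => none
  | l :: ls => if l == e then some ls else sScan e ls

def sGo : List String → List String → Bool
  | [], _ => true
  | e :: es, lines =>
    match sScan e lines with
    | none => false
    | some rest => sGo es rest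

-- occurrences of k in the stripped suffix s whose first element has absolute position p
def occFrom : List String → Int → String → List Int
  | [], _, _ => []
  | l :: ls, p, k => if l == k then p :: occFrom ls (p + 1) k else occFrom ls (p + 1) k

theorem pvGoA_eq_sGo (lines rem : List String) :
    pvGoA lines rem = sGo rem (lines.map PySem.Str.strip) := by
  induction lines generalizing rem with
  | nil => cases rem with
    | nil => simp [pvGoA, sGo]
    | cons e es => simp [pvGoA, sGo, sScan]
  | cons l ls ih =>
    cases rem with
    | nil => simp [pvGoA, sGo]
    | cons e es =>
      by_cases h : PySem.Str.strip l == e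
      · simp [pvGoA, sGo, sScan, h, ih]
      · simp only [pvGoA, sGo, sScan, List.map, h, Bool.false_eq_true, if_false]
        rw [ih (e :: es)]
        simp [sGo]

theorem dropLt_occFrom_le {p' p : Int} (h : p' ≤ p) (s : List String) (k : String) :
    pvDropLt (occFrom s p k) p' = occFrom s p k := by
  induction s generalizing p with
  | nil => simp [occFrom, pvDropLt]
  | cons l ls ih =>
    by_cases hl : l == k
    · simp [occFrom, hl, pvDropLt, not_lt.mpr h]
    · simp only [occFrom, hl, Bool.false_eq_true, if_false]
      exact ih (by omega)

theorem dropLt_dropLt {p p' : Int} (h : p ≤ p') (l : List Int) :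
    pvDropLt (pvDropLt l p) p' = pvDropLt l p' := by
  induction l with
  | nil => simp [pvDropLt]
  | cons i t ih =>
    by_cases hi : i < p
    · simp [pvDropLt, hi, if_pos (by omega : i < p'), ih]
    · simp [pvDropLt, hi]

-- the key step lemma: what occFrom says about one sScan step
theorem occFrom_step (s : List String) (pos : Int) (e : String) :
    (occFrom s pos e = [] → sScan e s = none) ∧
    (∀ i rest, occFrom s pos e = i :: rest →
      pos ≤ i ∧ ∃ s', sScan e s = some s' ∧ rest = occFrom s' (i + 1) e ∧
        ∀ k, pvDropLt (occFrom s pos k) (i + 1) = occFrom s' (i + 1) k) := by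
  induction s generalizing pos with
  | nil =>
    refine ⟨fun _ => rfl, fun i rest h => by simp [occFrom] at h⟩
  | cons l ls ih =>
    by_cases hl : l == e
    · refine ⟨fun h => by simp [occFrom, hl] at h, fun i rest h => ?_⟩
      simp only [occFrom, hl, if_pos] at h
      obtain ⟨hi, hrest⟩ : pos = i ∧ occFrom ls (pos + 1) e = rest := by
        exact ⟨(List.cons.injEq _ _ _ _ ▸ h).1, (List.cons.injEq _ _ _ _ ▸ h).2⟩
      subst hi
      refine ⟨le_refl _, ls, by simp [sScan, hl], hrest.symm, fun k => ?_⟩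
      by_cases hk : l == k
      · simp only [occFrom, hk, if_pos, pvDropLt, if_pos (by omega : pos < pos + 1)]
        exact dropLt_occFrom_le (le_refl _) ls k
      · simp only [occFrom, hk, Bool.false_eq_true, if_false]
        exact dropLt_occFrom_le (le_refl _) ls k
    · constructor
      · intro h
        simp only [occFrom, hl, Bool.false_eq_true, if_false] at h
        simp [sScan, hl, (ih (pos + 1)).1 h]
      · intro i rest h
        simp only [occFrom, hl, Bool.false_eq_true, if_false] at h
        obtain ⟨hle, s', hscan, hrest, hall⟩ := (ih (pos + 1)).2 i rest h
        refine ⟨by omega, s', by simp [sScan, hl, hscan], hrest, fun k => ?_⟩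
        by_cases hk : l == k
        · simp only [occFrom, hk, if_pos, pvDropLt, if_pos (by omega : pos < i + 1)]
          exact hall k
        · simp only [occFrom, hk, Bool.false_eq_true, if_false]
          exact hall k

-- the simulation invariant: stored lists, after dropping < pos, are exactly the occurrences ≥ pos
theorem pvGoAlt_eq_sGo (es : List String) (d : PySem.Dict String (List Int)) (pos : Int)
    (s : List String) (hinv : ∀ k, pvDropLt (d.getD k []) pos = occFrom s pos k) :
    pvGoAlt es d pos = sGo es s := by
  induction es generalizing d pos s with
  | nil => rfl
  | cons e es ih =>
    have he := hinv e
    rcases hocc : occFrom s pos e with _ | ⟨i, rest⟩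
    · have hnone := (occFrom_step s pos e).1 hocc
      simp [pvGoAlt, he, hocc, sGo, hnone]
    · obtain ⟨hle, s', hscan, hrest, hall⟩ := (occFrom_step s pos e).2 i rest hocc
      have step : pvGoAlt (e :: es) d pos = pvGoAlt es (d.insert e rest) (i + 1) := by
        simp [pvGoAlt, he, hocc]
      rw [step]
      have hgoal : pvGoAlt es (d.insert e rest) (i + 1) = sGo es s' := by
        apply ih
        intro k
        rw [PySem.Dict.getD_insert]
        by_cases hk : k = e
        · subst hk
          have := hall k
          rw [hocc] at this
          simpa [pvDropLt, if_pos (by omega : i < i + 1)] using this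
        · simp only [if_neg hk]
          rw [← dropLt_dropLt (by omega : pos ≤ i + 1) (d.getD k []), hinv k]
          exact hall k
      rw [hgoal]
      simp [sGo, hscan]

-- the built index: getD k [] is exactly the occurrence list of k from position 0
theorem enumerate_filter_eq_occFrom (ls : List String) (n : Int) (k : String) :
    (((PySem.List.enumerate ls n).map (fun p => (PySem.Str.strip p.2, p.1))).filter
        (fun q => q.1 == k)).map (·.2) = occFrom (ls.map PySem.Str.strip) n k := by
  induction ls generalizing n with
  | nil => simp [PySem.List.enumerate_nil, occFrom]
  | cons l ls ih =>
    rw [PySem.List.enumerate_cons]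
    by_cases hl : PySem.Str.strip l == k
    · simp [hl, occFrom, ih]
    · simp [hl, occFrom, ih]

theorem pvIndex_getD (lines : List String) (k : String) :
    (pvIndex lines).getD k [] = occFrom (lines.map PySem.Str.strip) 0 k := by
  unfold pvIndex
  have : (PySem.List.enumerate lines).foldl
      (fun d p => d.modify (PySem.Str.strip p.2) [] (fun v => v ++ [p.1])) PySem.Dict.empty
    = ((PySem.List.enumerate lines).map (fun p => (PySem.Str.strip p.2, p.1))).foldl
      (fun d q => d.modify q.1 [] (fun v => v ++ [q.2])) PySem.Dict.empty := by
    rw [List.foldl_map]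
  rw [this, PySem.Dict.getD_foldl_modify_append, PySem.Dict.getD_empty]
  simpa using enumerate_filter_eq_occFrom lines 0 k

-- ===== VERDICT (by name: the statement is the Claim_ definition above) =====
theorem contains_ordered_lines_py_spec : Claim_equal_contains_ordered_lines_py := by
  intro text expected_lines _
  unfold Spec_contains_ordered_lines_py contains_ordered_lines_py contains_ordered_lines_py_alt
  rw [pvGoA_eq_sGo]
  symm
  apply pvGoAlt_eq_sGo
  intro k
  rw [pvIndex_getD]
  exact dropLt_occFrom_le (le_refl _) _ k
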